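-- pv_equiv track=rewrite | github.com/badboy99tw/LeetCode | 0005_Longest_Palindromic_Substring.py | getLongestOddPalindrome
-- ===== SOURCE A (Python) =====
-- from typing import Optional
--
-- def getLongestOddPalindrome(s: str, center: int) -> Optional[dict]:
--     longestPalindrome = {
--         "start": center,
--         "end": center,
--     }
--     longestHelfLength = min(center, len(s) - center - 1)
--     for i in range(1, longestHelfLength + 1):
--         if s[center - i] == s[center + i]:
--             longestPalindrome = {
--                 "start": center - i,
--                 "end": center + i,
--             }
--         else:
--             return longestPalindrome
--     return longestPalindrome
-- ===== SOURCE B (Python) =====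
-- def getLongestOddPalindrome(s, center):
--     # Binary search for the palindrome half-length: build the outward-facing
--     # strings (reversed prefix / suffix) and bisect on the longest k with
--     # left[:k] == right[:k] (prefix equality is monotone in k).
--     left = s[:max(center, 0)][::-1]
--     right = s[center + 1:]
--     lo, hi = 0, min(len(left), len(right))
--     while lo < hi:
--         mid = (lo + hi + 1) // 2
--         if left[:mid] == right[:mid]:
--             lo = mid
--         else:
--             hi = mid - 1
--     return {"start": center - lo, "end": center + lo}
-- ===== Notes on version B (the rewrite author's own statement) =====
-- stated objective: alternative
-- what changed: Replaces the incremental expand-around-center loop (compare s[center-i]/s[center+i], keep the last matching dict, early return) by constructing the reversed prefix and the suffix and binary-searching the largest k with left[:k] == right[:k] via slice comparison.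
import Mathlib
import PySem

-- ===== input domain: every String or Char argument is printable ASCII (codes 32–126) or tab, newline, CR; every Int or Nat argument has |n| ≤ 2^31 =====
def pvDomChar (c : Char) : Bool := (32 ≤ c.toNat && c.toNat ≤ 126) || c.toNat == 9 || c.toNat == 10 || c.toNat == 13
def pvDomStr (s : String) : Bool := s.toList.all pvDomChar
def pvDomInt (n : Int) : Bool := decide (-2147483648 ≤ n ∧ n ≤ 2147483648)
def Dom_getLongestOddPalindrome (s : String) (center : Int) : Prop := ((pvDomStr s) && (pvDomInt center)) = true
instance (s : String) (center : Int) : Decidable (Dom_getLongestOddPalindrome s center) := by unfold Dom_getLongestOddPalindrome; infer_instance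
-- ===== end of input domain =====

-- B replaces A's incremental expand-around-center loop by a binary search (via slice
-- comparison) for the palindrome half-length; alternative structure, not claimed faster.

-- ===== PORT A =====
-- the for-loop over range(1, longestHelfLength+1); state = current longestPalindrome dict
def pvLoopA (s : String) (center : Int) : List Int → List (String × Int) → Option (List (String × Int))
  | [], acc => some acc
  | i :: rest, acc =>
    match PySem.Str.pyGet? s (center - i), PySem.Str.pyGet? s (center + i) with
    | some a, some b =>
      if a = b then
        pvLoopA s center rest [("start", center - i), ("end", center + i)]
      else some acc
    | _, _ => none  -- IndexError (never reached: loop indices are in range)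

def getLongestOddPalindrome (s : String) (center : Int) : Option (List (String × Int)) :=
  let longestHelfLength := min center (PySem.Str.len s - center - 1)
  pvLoopA s center (PySem.List.pyRange 1 (longestHelfLength + 1) 1)
    [("start", center), ("end", center)]

-- ===== PORT B =====
-- mid = (lo + hi + 1) // 2
def pvMidB (lo hi : Int) : Int := PySem.Int.floordiv (lo + hi + 1) 2

-- the `while lo < hi` binary-search loop of Source B
def pvBisectB (left right : List Char) (lo hi : Int) : Int :=
  if lo < hi then
    if PySem.List.slice left none (some (pvMidB lo hi)) = PySem.List.slice right none (some (pvMidB lo hi)) then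
      pvBisectB left right (pvMidB lo hi) hi
    else
      pvBisectB left right lo (pvMidB lo hi - 1)
  else lo
termination_by (hi - lo).toNat
decreasing_by
  · have h := PySem.Int.floordiv_eq_ediv_of_pos (a := lo + hi + 1) (b := 2) (by omega)
    simp only [pvMidB, h]; omega
  · have h := PySem.Int.floordiv_eq_ediv_of_pos (a := lo + hi + 1) (b := 2) (by omega)
    simp only [pvMidB, h]; omega

def getLongestOddPalindrome_alt (s : String) (center : Int) : Option (List (String × Int)) :=
  -- left = s[:max(center, 0)][::-1]  ([::-1] is reverse: PySem.Str.slice?_none_none_neg_one)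
  let left := (PySem.Str.slice s none (some (max center 0))).toList.reverse
  -- right = s[center + 1:]
  let right := (PySem.Str.slice s (some (center + 1)) none).toList
  let lo := pvBisectB left right 0 (min (left.length : Int) (right.length : Int))
  some [("start", center - lo), ("end", center + lo)]

-- ===== PRECONDITION & SPEC =====
def Spec_getLongestOddPalindrome (s : String) (center : Int) (out : Option (List (String × Int))) : Prop := out = getLongestOddPalindrome_alt s center
instance (s : String) (center : Int) (out : Option (List (String × Int))) : Decidable (Spec_getLongestOddPalindrome s center out) := by unfold Spec_getLongestOddPalindrome; infer_instance

-- ===== CLAIM (what is proved, stated in full; the proofs are below) =====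
def Claim_equal_getLongestOddPalindrome : Prop := ∀ (s : String) (center : Int), Dom_getLongestOddPalindrome s center → Spec_getLongestOddPalindrome s center (getLongestOddPalindrome s center)

-- ===== LEMMAS AND PROOFS =====

-- longest common prefix length: the value both programs compute
def pvCpl : List Char → List Char → Nat
  | a :: as, b :: bs => if a = b then pvCpl as bs + 1 else 0
  | _, _ => 0

theorem pvCpl_le (l r : List Char) : pvCpl l r ≤ min l.length r.length := by
  induction l generalizing r with
  | nil => simp [pvCpl]
  | cons a as ih =>
    cases r with
    | nil => simp [pvCpl]
    | cons b bs =>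
      simp only [pvCpl, List.length_cons]
      split
      · have := ih bs; omega
      · omega

theorem pvTake_eq_iff (l r : List Char) (k : Nat) (hl : k ≤ l.length) (hr : k ≤ r.length) :
    l.take k = r.take k ↔ k ≤ pvCpl l r := by
  induction k generalizing l r with
  | zero => simp
  | succ k ih =>
    cases l with
    | nil => simp at hl
    | cons a as =>
      cases r with
      | nil => simp at hr
      | cons b bs =>
        simp only [List.take_succ_cons, List.cons.injEq, pvCpl]
        by_cases hab : a = b
        · subst hab
          rw [if_pos rfl, ih as bs (by simpa using hl) (by simpa using hr)]
          constructor
          · rintro ⟨_, h⟩; omega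
          · intro h; exact ⟨rfl, by omega⟩
        · rw [if_neg hab]
          constructor
          · rintro ⟨h, _⟩; exact absurd h hab
          · omega

theorem pvBisectB_eq (l r : List Char) (lo hi : Int) (h1 : 0 ≤ lo)
    (h2 : lo ≤ (pvCpl l r : Int)) (h3 : (pvCpl l r : Int) ≤ hi)
    (h4 : hi ≤ min (l.length : Int) (r.length : Int)) :
    pvBisectB l r lo hi = (pvCpl l r : Int) := by
  generalize hk : (hi - lo).toNat = k
  induction k using Nat.strong_induction_on generalizing lo hi with
  | _ k ih =>
    rw [pvBisectB]
    split
    · next hlt =>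
      have hm : pvMidB lo hi = (lo + hi + 1) / 2 :=
        PySem.Int.floordiv_eq_ediv_of_pos (a := lo + hi + 1) (b := 2) (by omega)
      have hb1 : lo < pvMidB lo hi := by omega
      have hb2 : pvMidB lo hi ≤ hi := by omega
      have hml : (pvMidB lo hi).toNat ≤ l.length := by omega
      have hmr : (pvMidB lo hi).toNat ≤ r.length := by omega
      rw [PySem.List.slice_to l (by omega : (0:Int) ≤ pvMidB lo hi),
          PySem.List.slice_to r (by omega : (0:Int) ≤ pvMidB lo hi)]
      by_cases heq : l.take (pvMidB lo hi).toNat = r.take (pvMidB lo hi).toNat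
      · rw [if_pos heq]
        have hle : (pvMidB lo hi).toNat ≤ pvCpl l r :=
          (pvTake_eq_iff l r (pvMidB lo hi).toNat hml hmr).mp heq
        exact ih (hi - pvMidB lo hi).toNat (by omega) (pvMidB lo hi) hi (by omega) (by omega) h3 h4 rfl
      · rw [if_neg heq]
        have hgt : ¬ ((pvMidB lo hi).toNat ≤ pvCpl l r) := fun h =>
          heq ((pvTake_eq_iff l r (pvMidB lo hi).toNat hml hmr).mpr h)
        exact ih (pvMidB lo hi - 1 - lo).toNat (by omega) lo (pvMidB lo hi - 1) h1 h2 (by omega) (by omega) rfl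
    · next hlt => omega

theorem pvTake_succ_getElem (l r : List Char) (j : Nat) (hl : j < l.length) (hr : j < r.length)
    (h : l.take (j + 1) = r.take (j + 1)) : l[j] = r[j] := by
  have h2 := congrArg (fun t => t[j]?) h
  simp only [List.getElem?_take, Nat.lt_succ_self, if_pos, List.getElem?_eq_getElem, hl, hr] at h2
  simpa using h2

theorem pvTake_succ_of (l r : List Char) (j : Nat) (hl : j < l.length) (hr : j < r.length)
    (htake : l.take j = r.take j) (hj : l[j] = r[j]) : l.take (j + 1) = r.take (j + 1) := by
  rw [List.take_add_one, List.take_add_one, htake, List.getElem?_eq_getElem hl,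
      List.getElem?_eq_getElem hr, hj]

theorem pvLoopA_eq (s : String) (c L : Nat) (hn : c < s.toList.length)
    (hL : L = min c (s.toList.length - c - 1)) :
    ∀ (k j : Nat), L - j = k → j ≤ L →
      ((s.toList.take c).reverse.take j = (s.toList.drop (c + 1)).take j) →
      pvLoopA s (c : Int) (PySem.List.pyRange ((j : Int) + 1) ((L : Int) + 1) 1)
        [("start", (c : Int) - (j : Int)), ("end", (c : Int) + (j : Int))] =
      some [("start", (c : Int) - (pvCpl (s.toList.take c).reverse (s.toList.drop (c + 1)) : Int)),
            ("end", (c : Int) + (pvCpl (s.toList.take c).reverse (s.toList.drop (c + 1)) : Int))] := by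
  intro k
  have hlenl : ((s.toList.take c).reverse).length = c := by
    rw [List.length_reverse, List.length_take]; omega
  have hlenr : ((s.toList.drop (c + 1))).length = s.toList.length - c - 1 := by
    rw [List.length_drop]; omega
  induction k with
  | zero =>
    intro j hk hj htake
    rw [PySem.List.pyRange_one_eq_nil (by omega)]
    have h1 : j ≤ pvCpl (s.toList.take c).reverse (s.toList.drop (c + 1)) := by
      rw [← pvTake_eq_iff _ _ j (by omega) (by omega)]; exact htake
    have h2 : pvCpl (s.toList.take c).reverse (s.toList.drop (c + 1)) ≤ j := by
      have := pvCpl_le (s.toList.take c).reverse (s.toList.drop (c + 1)); omega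
    have heq : pvCpl (s.toList.take c).reverse (s.toList.drop (c + 1)) = j := by omega
    rw [heq, pvLoopA]
  | succ k ihk =>
    intro j hk hj htake
    have hjL : j < L := by omega
    -- the next loop index is j+1; both character accesses are in range
    rw [PySem.List.pyRange_one_cons (by omega)]
    have e1 : (c : Int) - ((j : Int) + 1) = ((c - j - 1 : Nat) : Int) := by omega
    have e2 : (c : Int) + ((j : Int) + 1) = ((c + j + 1 : Nat) : Int) := by omega
    have hi1 : c - j - 1 < s.toList.length := by omega
    have hi2 : c + j + 1 < s.toList.length := by omega
    have hjl : j < ((s.toList.take c).reverse).length := by omega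
    have hjr : j < (s.toList.drop (c + 1)).length := by omega
    have hlv : ((s.toList.take c).reverse)[j] = s.toList[c - j - 1] := by
      rw [List.getElem_reverse]
      rw [List.getElem_take]
      congr 1
      rw [List.length_take]
      omega
    have hrv : (s.toList.drop (c + 1))[j] = s.toList[c + j + 1] := by
      rw [List.getElem_drop]
      congr 1; omega
    rw [pvLoopA, e1, e2]
    rw [PySem.Str.pyGet?_natCast, PySem.Str.pyGet?_natCast,
        List.getElem?_eq_getElem hi1, List.getElem?_eq_getElem hi2]
    dsimp only
    by_cases hchar : s.toList[c - j - 1] = s.toList[c + j + 1]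
    · rw [if_pos hchar]
      have htake' : (s.toList.take c).reverse.take (j + 1) = (s.toList.drop (c + 1)).take (j + 1) :=
        pvTake_succ_of _ _ j hjl hjr htake (by rw [hlv, hrv, hchar])
      have hrec := ihk (j + 1) (by omega) (by omega) htake'
      rw [show ((c - j - 1 : Nat) : Int) = (c : Int) - (((j + 1 : Nat)) : Int) by omega,
          show ((c + j + 1 : Nat) : Int) = (c : Int) + (((j + 1 : Nat)) : Int) by omega,
          show (j : Int) + 1 + 1 = (((j + 1 : Nat)) : Int) + 1 by push_cast; ring]
      exact hrec
    · rw [if_neg hchar]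
      have h1 : j ≤ pvCpl (s.toList.take c).reverse (s.toList.drop (c + 1)) := by
        rw [← pvTake_eq_iff _ _ j (by omega) (by omega)]; exact htake
      have h2 : pvCpl (s.toList.take c).reverse (s.toList.drop (c + 1)) ≤ j := by
        by_contra hcon
        have ht1 : (s.toList.take c).reverse.take (j + 1) = (s.toList.drop (c + 1)).take (j + 1) := by
          rw [pvTake_eq_iff _ _ (j + 1) (by omega) (by omega)]; omega
        have ht2 := pvTake_succ_getElem _ _ j hjl hjr ht1
        rw [hlv, hrv] at ht2
        exact hchar ht2
      have heq : pvCpl (s.toList.take c).reverse (s.toList.drop (c + 1)) = j := by omega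
      rw [heq]

-- evaluate B's left/right lists for an in-range center
theorem pvAltLists (s : String) (c : Nat) :
    (PySem.Str.slice s none (some (max (c : Int) 0))).toList.reverse = (s.toList.take c).reverse ∧
    (PySem.Str.slice s (some ((c : Int) + 1)) none).toList = s.toList.drop (c + 1) := by
  constructor
  · have : max (c : Int) 0 = ((c : Nat) : Int) := by omega
    rw [this]
    simp [PySem.Str.slice, PySem.List.slice_to_natCast]
  · rw [show (PySem.Str.slice s (some ((c : Int) + 1)) none).toList
          = PySem.List.slice s.toList (some ((c : Int) + 1)) none by simp [PySem.Str.slice]]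
    rw [PySem.List.slice_from s.toList (by positivity : (0 : Int) ≤ (c : Int) + 1)]
    rw [show ((c : Int) + 1).toNat = c + 1 by omega]

-- ===== VERDICT (by name: the statement is the Claim_ definition above) =====
theorem getLongestOddPalindrome_spec : Claim_equal_getLongestOddPalindrome := by
  unfold Claim_equal_getLongestOddPalindrome
  intro s center _
  unfold Spec_getLongestOddPalindrome
  simp only [getLongestOddPalindrome, getLongestOddPalindrome_alt, PySem.Str.len_eq]
  by_cases hv : 0 ≤ center ∧ center < (s.toList.length : Int)
  · -- in-range center: both sides compute the common-prefix length
    obtain ⟨h0, hlt⟩ := hv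
    obtain ⟨c, rfl⟩ : ∃ c : Nat, center = (c : Int) := ⟨center.toNat, by omega⟩
    have hc : c < s.toList.length := by exact_mod_cast hlt
    obtain ⟨hleft, hright⟩ := pvAltLists s c
    rw [hleft, hright]
    have hlenl : ((s.toList.take c).reverse).length = c := by
      rw [List.length_reverse, List.length_take]; omega
    have hlenr : ((s.toList.drop (c + 1))).length = s.toList.length - c - 1 := by
      rw [List.length_drop]; omega
    have hmin : min ((c : Nat) : Int) ((s.toList.length : Int) - ((c : Nat) : Int) - 1)
        = ((min c (s.toList.length - c - 1) : Nat) : Int) := by omega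
    have hbs := pvBisectB_eq (s.toList.take c).reverse (s.toList.drop (c + 1)) 0
      ((min c (s.toList.length - c - 1) : Nat) : Int) (by omega)
      (by positivity)
      (by
        have hle := pvCpl_le (s.toList.take c).reverse (s.toList.drop (c + 1))
        rw [hlenl, hlenr] at hle
        exact_mod_cast hle)
      (by rw [hlenl, hlenr]; omega)
    have hloop := pvLoopA_eq s c (min c (s.toList.length - c - 1)) hc rfl
      (min c (s.toList.length - c - 1)) 0 (by omega) (by omega) (by simp)
    simp only [Nat.cast_zero, sub_zero, add_zero, zero_add] at hloop
    rw [hmin]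
    rw [hloop]
    rw [show min (((s.toList.take c).reverse.length : Nat) : Int) (((s.toList.drop (c + 1)).length : Nat) : Int)
          = ((min c (s.toList.length - c - 1) : Nat) : Int) by rw [hlenl, hlenr]; omega]
    rw [hbs]
  · -- out-of-range center: the loop range is empty and the search interval is [0,0]
    rw [PySem.List.pyRange_one_eq_nil (by omega), pvLoopA]
    have hhi : min (((PySem.Str.slice s none (some (max center 0))).toList.reverse.length : Nat) : Int)
        (((PySem.Str.slice s (some (center + 1)) none).toList.length : Nat) : Int) = 0 := by
      by_cases hneg : center < 0
      · rw [show max center 0 = ((0 : Nat) : Int) by omega]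
        rw [show (PySem.Str.slice s none (some ((0 : Nat) : Int))).toList
              = PySem.List.slice s.toList none (some ((0 : Nat) : Int)) by simp [PySem.Str.slice]]
        rw [PySem.List.slice_to_natCast]
        simp only [List.take_zero, List.reverse_nil, List.length_nil, Nat.cast_zero]
        omega
      · rw [show (PySem.Str.slice s (some (center + 1)) none).toList
              = PySem.List.slice s.toList (some (center + 1)) none by simp [PySem.Str.slice]]
        rw [PySem.List.slice_from s.toList (by omega : (0 : Int) ≤ center + 1)]
        rw [List.drop_eq_nil_of_le (by omega : s.toList.length ≤ (center + 1).toNat)]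
        simp only [List.length_nil, Nat.cast_zero]
        omega
    rw [hhi]
    rw [pvBisectB]
    simp
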